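-- pv_equiv track=rewrite | github.com/Thor10/tictactoe_ai | tictactoeai/tictactoe.py | selectFromCollection
-- ===== SOURCE A (Python) =====
-- def selectFromCollection(collectionIn):
-- 	winCollection = [ ] # Stores a collection of winning moves
-- 	looseCollection = [ ] # Stores a collection of loosing movies
-- 	tieCollection = [ ] # Stores a collection of tie / draw scenarios
--
-- 	# Get the collection length
-- 	collectionLength = len(collectionIn)
--
-- 	# Set index counter
-- 	indexCounter = 0
--
-- 	# Loop through and sort the passed in collection
-- 	while indexCounter < collectionLength:
-- 		# Check if win scenario
-- 		if collectionIn[indexCounter][0] == 10: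
-- 			winCollection.append(collectionIn[indexCounter])
--
-- 		# Check if loose scenario
-- 		if collectionIn[indexCounter][0] == -10:
-- 			looseCollection.append(collectionIn[indexCounter])
--
-- 		# Check if draw / tie scenario
-- 		if collectionIn[indexCounter][0] == 0:
-- 			tieCollection.append(collectionIn[indexCounter])
--
-- 		# Increment loop index counter
-- 		indexCounter = indexCounter + 1
--
-- 	# Check if there is a win scenario that can be selected
-- 	if len(winCollection) > 0:
-- 		selectedIndexMove = winCollection[0][2]
--
-- 	# Check to see if there is a loose scenario that can be selected
-- 	if len(winCollection) == 0 and len(looseCollection) > 0: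
-- 		selectedIndexMove = looseCollection[0][2]
--
-- 	if len(winCollection) == 0 and len(looseCollection) == 0:
-- 		selectedIndexMove = tieCollection[0][2]
--
-- 	# Return the selected move
-- 	return selectedIndexMove
-- ===== SOURCE B (Python) =====
-- def selectFromCollection(collectionIn):
-- 	# Priority search: first win (10), then loss (-10), then tie (0); return on first match.
-- 	for score in (10, -10, 0):
-- 		for entry in collectionIn:
-- 			if entry[0] == score:
-- 				return entry[2]
-- 	raise IndexError("list index out of range")
-- ===== Notes on version B (the rewrite author's own statement) =====
-- stated objective: idiomatic
-- what changed: Replaces the index-counter while loop that builds three category lists with a short-circuiting priority search (for each score 10, -10, 0, return the third component of the first matching element).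
import Mathlib
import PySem

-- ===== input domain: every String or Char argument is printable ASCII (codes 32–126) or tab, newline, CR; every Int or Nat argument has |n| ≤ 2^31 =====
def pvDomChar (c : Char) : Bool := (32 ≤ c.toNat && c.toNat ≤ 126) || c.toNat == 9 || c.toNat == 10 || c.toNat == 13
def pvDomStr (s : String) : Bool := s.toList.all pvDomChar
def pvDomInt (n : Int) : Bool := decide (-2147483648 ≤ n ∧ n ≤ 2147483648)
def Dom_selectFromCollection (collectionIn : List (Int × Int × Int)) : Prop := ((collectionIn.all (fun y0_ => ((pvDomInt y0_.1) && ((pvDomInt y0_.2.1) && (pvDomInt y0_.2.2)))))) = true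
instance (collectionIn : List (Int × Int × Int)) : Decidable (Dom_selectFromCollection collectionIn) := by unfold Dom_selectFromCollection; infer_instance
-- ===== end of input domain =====

-- B replaces A's while-loop that builds three category lists with a short-circuiting
-- priority search (win 10, then loss -10, then tie 0) — objective: idiomatic.


-- ===== PORT A =====
-- The while loop walks the list front to back, appending each element into the
-- matching category list (three independent ifs, as in the source).
def selectFromCollectionLoop (xs : List (Int × Int × Int))
    (win loose tie : List (Int × Int × Int)) :
    List (Int × Int × Int) × List (Int × Int × Int) × List (Int × Int × Int) :=
  match xs with
  | [] => (win, loose, tie)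
  | x :: rest =>
      selectFromCollectionLoop rest
        (if x.1 = 10 then win ++ [x] else win)
        (if x.1 = -10 then loose ++ [x] else loose)
        (if x.1 = 0 then tie ++ [x] else tie)

def selectFromCollection (collectionIn : List (Int × Int × Int)) : Int :=
  let r := selectFromCollectionLoop collectionIn [] [] []
  let win := r.1
  let loose := r.2.1
  let tie := r.2.2
  if win.length > 0 then (win.headD (0, 0, 0)).2.2
  else if loose.length > 0 then (loose.headD (0, 0, 0)).2.2
  -- tieCollection[0] raises IndexError when tie is empty; Pre_ excludes that, default 0 here
  else ((PySem.List.pyGet? tie 0).map (·.2.2)).getD 0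

-- ===== PORT B =====
def selectFromCollection_alt (collectionIn : List (Int × Int × Int)) : Int :=
  match collectionIn.find? (fun x => x.1 == 10) with
  | some x => x.2.2
  | none =>
    match collectionIn.find? (fun x => x.1 == -10) with
    | some x => x.2.2
    | none =>
      match collectionIn.find? (fun x => x.1 == 0) with
      | some x => x.2.2
      | none => 0  -- B raises IndexError here; Pre_ excludes it

-- ===== PRECONDITION & SPEC =====
-- Pre_ excludes exactly the inputs with no element scored 10, -10 or 0: there both
-- A and B raise IndexError.
def Pre_selectFromCollection (collectionIn : List (Int × Int × Int)) : Prop :=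
  ∃ x ∈ collectionIn, x.1 = 10 ∨ x.1 = -10 ∨ x.1 = 0
instance (collectionIn : List (Int × Int × Int)) : Decidable (Pre_selectFromCollection collectionIn) := by unfold Pre_selectFromCollection; infer_instance
def pvWitness_selectFromCollection : (List (Int × Int × Int)) := [(0, 1, 4)]

def Spec_selectFromCollection (collectionIn : List (Int × Int × Int)) (out : Int) : Prop := out = selectFromCollection_alt collectionIn
instance (collectionIn : List (Int × Int × Int)) (out : Int) : Decidable (Spec_selectFromCollection collectionIn out) := by unfold Spec_selectFromCollection; infer_instance

-- ===== CLAIM (what is proved, stated in full; the proofs are below) =====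
def Claim_equal_selectFromCollection : Prop := ∀ (collectionIn : List (Int × Int × Int)), Dom_selectFromCollection collectionIn → Pre_selectFromCollection collectionIn → Spec_selectFromCollection collectionIn (selectFromCollection collectionIn)

-- ===== LEMMAS AND PROOFS =====

theorem selectFromCollectionLoop_eq (xs win loose tie : List (Int × Int × Int)) :
    selectFromCollectionLoop xs win loose tie =
      (win ++ xs.filter (fun x => x.1 == 10),
       loose ++ xs.filter (fun x => x.1 == -10),
       tie ++ xs.filter (fun x => x.1 == 0)) := by
  induction xs generalizing win loose tie with
  | nil => simp [selectFromCollectionLoop]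
  | cons x rest ih =>
    simp only [selectFromCollectionLoop, ih, List.filter_cons]
    split_ifs with h1 h2 h3 <;> simp_all

theorem find?_eq_head?_filter (p : (Int × Int × Int) → Bool) (xs : List (Int × Int × Int)) :
    xs.find? p = (xs.filter p).head? := by
  induction xs with
  | nil => rfl
  | cons x rest ih =>
    by_cases h : p x
    · rw [List.find?_cons_of_pos h, List.filter_cons_of_pos h, List.head?_cons]
    · rw [List.find?_cons_of_neg h, List.filter_cons_of_neg h, ih]

theorem mem_filter_ne_nil {xs : List (Int × Int × Int)} {x : Int × Int × Int} {p}
    (hx : x ∈ xs) (hp : p x = true) : xs.filter p ≠ [] := by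
  intro h
  have := List.mem_filter.mpr ⟨hx, hp⟩
  rw [h] at this
  exact absurd this (List.not_mem_nil)

-- ===== VERDICT (by name: the statement is the Claim_ definition above) =====
theorem selectFromCollection_spec : Claim_equal_selectFromCollection := by
  intro xs _ hpre
  unfold Spec_selectFromCollection selectFromCollection selectFromCollection_alt
  simp only [selectFromCollectionLoop_eq, List.nil_append]
  rw [find?_eq_head?_filter, find?_eq_head?_filter, find?_eq_head?_filter]
  cases hW : xs.filter (fun x => x.1 == 10) with
  | cons w ws => simp
  | nil =>
    cases hL : xs.filter (fun x => x.1 == -10) with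
    | cons l ls => simp
    | nil =>
      cases hT : xs.filter (fun x => x.1 == 0) with
      | cons t ts => simp [PySem.List.pyGet?, PySem.List.pyIdx?]
      | nil =>
        exfalso
        obtain ⟨x, hx, h | h | h⟩ := hpre
        · exact mem_filter_ne_nil hx (by simp [h]) hW
        · exact mem_filter_ne_nil hx (by simp [h]) hL
        · exact mem_filter_ne_nil hx (by simp [h]) hT
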